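-- pv_equiv track=rewrite | github.com/rodoufu/challenges | leetCode/math/CalculateMoneyInLeetcodeBank.py | totalMoney
-- ===== SOURCE A (Python) =====
-- def totalMoney(n: int) -> int:
--     deposit_monday = 0
--     deposit = 0
--     balance = 0
--     for i in range(1, n + 1):
--         if i % 7 == 1:
--             deposit_monday += 1
--             deposit = deposit_monday
--         else:
--             deposit += 1
--         balance += deposit
--     return balance
-- ===== SOURCE B (Python) =====
-- def totalMoney(n: int) -> int:
--     if n <= 0:
--         return 0
--     w, r = divmod(n, 7)
--     return 28 * w + 7 * w * (w - 1) // 2 + r * (w + 1) + r * (r - 1) // 2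
-- ===== Notes on version B (the rewrite author's own statement) =====
-- stated objective: faster
-- what changed: Replaced A's day-by-day simulation loop (tracking the Monday deposit, the current deposit and the running balance over n iterations) with a closed-form arithmetic-series computation from the number of full weeks and leftover days.
import Mathlib
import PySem

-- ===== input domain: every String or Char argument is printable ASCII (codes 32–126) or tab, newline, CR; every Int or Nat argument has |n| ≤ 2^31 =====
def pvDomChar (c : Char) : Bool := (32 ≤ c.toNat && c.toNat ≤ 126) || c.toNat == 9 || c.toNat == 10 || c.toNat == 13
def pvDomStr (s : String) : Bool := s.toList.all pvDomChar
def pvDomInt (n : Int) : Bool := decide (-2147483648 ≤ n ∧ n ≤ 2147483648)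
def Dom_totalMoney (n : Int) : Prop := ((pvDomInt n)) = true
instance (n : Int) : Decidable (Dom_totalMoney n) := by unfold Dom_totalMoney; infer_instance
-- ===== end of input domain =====

-- B replaces A's day-by-day loop with O(1) closed-form arithmetic (weeks/remainder); equality of return values is proved below.

-- ===== PORT A =====
def totalMoney (n : Int) : Int :=
  ((PySem.List.pyRange 1 (n + 1) 1).foldl
    (fun (st : Int × Int × Int) i =>
      let dm := st.1
      let dep := st.2.1
      let bal := st.2.2
      if PySem.Int.mod i 7 = 1 then
        let dm := dm + 1
        let dep := dm
        (dm, dep, bal + dep)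
      else
        let dep := dep + 1
        (dm, dep, bal + dep))
    (0, 0, 0)).2.2

-- ===== PORT B =====
def totalMoney_alt (n : Int) : Int :=
  if n ≤ 0 then 0
  else
    let w := PySem.Int.floordiv n 7
    let r := PySem.Int.mod n 7
    28 * w + PySem.Int.floordiv (7 * w * (w - 1)) 2 + r * (w + 1)
      + PySem.Int.floordiv (r * (r - 1)) 2

-- ===== PRECONDITION & SPEC =====
def Spec_totalMoney (n : Int) (out : Int) : Prop := out = totalMoney_alt n
instance (n : Int) (out : Int) : Decidable (Spec_totalMoney n out) := by unfold Spec_totalMoney; infer_instance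

-- ===== CLAIM (what is proved, stated in full; the proofs are below) =====
def Claim_equal_totalMoney : Prop := ∀ (n : Int), Dom_totalMoney n → Spec_totalMoney n (totalMoney n)

-- ===== LEMMAS AND PROOFS =====

-- Nat-side descriptions of A's loop state after m days.
def pvDep (m : Nat) : Nat := if m = 0 then 0 else (m - 1) / 7 + 1 + (m - 1) % 7
def pvSum : Nat → Nat
  | 0 => 0
  | m + 1 => pvSum m + (m / 7 + 1 + m % 7)

-- A's state after folding the days 1..m.
theorem pv_loop_inv (m : Nat) :
    ((PySem.List.pyRange 1 ((m : Int) + 1) 1).foldl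
      (fun (st : Int × Int × Int) i =>
        let dm := st.1
        let dep := st.2.1
        let bal := st.2.2
        if PySem.Int.mod i 7 = 1 then
          let dm := dm + 1
          let dep := dm
          (dm, dep, bal + dep)
        else
          let dep := dep + 1
          (dm, dep, bal + dep))
      (0, 0, 0)) = ((((m + 6) / 7 : Nat) : Int), ((pvDep m : Nat) : Int), ((pvSum m : Nat) : Int)) := by
  induction m with
  | zero => simp [PySem.List.pyRange_one_eq_nil, pvDep]
  | succ m ih =>
      have h : ((m + 1 : Nat) : Int) + 1 = ((m : Int) + 1) + 1 := by push_cast; ring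
      rw [h, PySem.List.pyRange_one_succ_right (by omega), List.foldl_append, ih]
      simp only [List.foldl]
      have hmod : PySem.Int.mod ((m : Int) + 1) 7 = (((m + 1) % 7 : Nat) : Int) := by
        rw [PySem.Int.mod_eq_emod_of_pos (by norm_num)]
        push_cast; omega
      rw [hmod]
      by_cases hc : (m + 1) % 7 = 1
      · rw [if_pos (by exact_mod_cast hc)]
        simp only [pvDep, pvSum, Prod.mk.injEq]
        refine ⟨by push_cast; omega, by push_cast; omega, by push_cast; omega⟩
      · rw [if_neg (by exact_mod_cast hc)]
        simp only [pvDep, pvSum, Prod.mk.injEq]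
        refine ⟨by push_cast; omega, by push_cast; omega, by push_cast; omega⟩

-- Closed form for pvSum, in Nat (all divisions are exact).
theorem pv_sum_closed (m : Nat) :
    pvSum m = 28 * (m / 7) + 7 * (m / 7) * (m / 7 - 1) / 2
      + m % 7 * (m / 7 + 1) + m % 7 * (m % 7 - 1) / 2 := by
  induction m with
  | zero => simp [pvSum]
  | succ m ih =>
      obtain ⟨k, hk⟩ : ∃ k, m / 7 * (m / 7 - 1) = 2 * k := by
        cases h : m / 7 with
        | zero => exact ⟨0, by simp⟩
        | succ v =>
            obtain ⟨j, hj⟩ := Nat.even_mul_succ_self v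
            exact ⟨j, by simp only [Nat.succ_sub_one]; rw [Nat.mul_comm]; omega⟩
      by_cases hr : m % 7 = 6
      · -- week boundary: (m+1)/7 = m/7 + 1, (m+1)%7 = 0
        have hstep : (m / 7 + 1) * (m / 7 + 1 - 1) = m / 7 * (m / 7 - 1) + 2 * (m / 7) := by
          cases m / 7 with
          | zero => simp
          | succ v => simp only [Nat.succ_sub_one]; ring
        obtain ⟨k', hk'⟩ : ∃ k', (m / 7 + 1) * (m / 7 + 1 - 1) = 2 * k' := ⟨k + m / 7, by omega⟩
        rw [pvSum, ih]
        have h1 : (m + 1) / 7 = m / 7 + 1 := by omega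
        have h2 : (m + 1) % 7 = 0 := by omega
        rw [h1, h2]
        have e1 : 7 * (m / 7) * (m / 7 - 1) / 2 = 7 * k := by
          rw [show 7 * (m / 7) * (m / 7 - 1) = 7 * (2 * k) by rw [← hk]; ring]; omega
        have e2 : 7 * (m / 7 + 1) * (m / 7 + 1 - 1) / 2 = 7 * k' := by
          rw [show 7 * (m / 7 + 1) * (m / 7 + 1 - 1) = 7 * (2 * k') by rw [← hk']; ring]; omega
        rw [e1, e2, hr]; omega
      · -- mid-week: (m+1)/7 = m/7, (m+1)%7 = m%7 + 1
        rw [pvSum, ih]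
        have h1 : (m + 1) / 7 = m / 7 := by omega
        have h2 : (m + 1) % 7 = m % 7 + 1 := by omega
        rw [h1, h2]
        have hr7 : m % 7 < 7 := Nat.mod_lt _ (by omega)
        interval_cases h : m % 7 <;> omega

theorem totalMoney_eq_nat (m : Nat) : totalMoney (m : Int) = ((pvSum m : Nat) : Int) := by
  unfold totalMoney
  rw [pv_loop_inv m]

-- ===== VERDICT (by name: the statement is the Claim_ definition above) =====
theorem totalMoney_spec : Claim_equal_totalMoney := by
  intro n _
  show totalMoney n = totalMoney_alt n
  by_cases hn : n ≤ 0
  · unfold totalMoney totalMoney_alt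
    rw [PySem.List.pyRange_one_eq_nil (by omega), if_pos hn]
    simp
  · obtain ⟨m, rfl⟩ : ∃ m : Nat, n = (m : Int) := ⟨n.toNat, by omega⟩
    have hm : 0 < m := by exact_mod_cast (by omega : (0 : Int) < m)
    rw [totalMoney_eq_nat m, pv_sum_closed m]
    unfold totalMoney_alt
    rw [if_neg hn]
    have hw : PySem.Int.floordiv (m : Int) 7 = ((m / 7 : Nat) : Int) := by
      exact_mod_cast PySem.Int.floordiv_natCast m 7
    have hr : PySem.Int.mod (m : Int) 7 = ((m % 7 : Nat) : Int) := by
      exact_mod_cast PySem.Int.mod_natCast m 7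
    simp only [hw, hr]
    by_cases hw0 : m / 7 = 0
    · have hr7 : m % 7 < 7 := Nat.mod_lt _ (by omega)
      rw [hw0]
      interval_cases h : m % 7 <;> norm_num [PySem.Int.floordiv] <;> push_cast
    · have hcast1 : ((7 : Int) * ((m / 7 : Nat) : Int) * (((m / 7 : Nat) : Int) - 1))
          = ((7 * (m / 7) * (m / 7 - 1) : Nat) : Int) := by
        push_cast [Nat.cast_sub (by omega : 1 ≤ m / 7)]; ring
      have hdiv1 : PySem.Int.floordiv ((7 * (m / 7) * (m / 7 - 1) : Nat) : Int) 2
          = ((7 * (m / 7) * (m / 7 - 1) / 2 : Nat) : Int) := by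
        exact_mod_cast PySem.Int.floordiv_natCast _ 2
      have hr7 : m % 7 < 7 := Nat.mod_lt _ (by omega)
      rw [hcast1, hdiv1]
      interval_cases h : m % 7 <;> push_cast <;> ring_nf <;>
        simp [PySem.Int.floordiv] <;> push_cast <;> ring_nf
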